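-- pv_equiv track=rewrite | github.com/Matheus-HX-Alves/Python | PrimeirosExercicios/jogo_nim.py | computador_escolhe_jogada
-- ===== SOURCE A (Python) =====
-- def computador_escolhe_jogada(n,m):
--     CompRemove = 1
--     while CompRemove != n:
--         if (n - CompRemove) % (m+1) == 0:
--             return CompRemove
--         else:
--             CompRemove += 1
--     return CompRemove
-- ===== SOURCE B (Python) =====
-- def computador_escolhe_jogada(n, m):
--     # Smallest positive removal leaving a multiple of m+1: closed form, O(1).
--     return (n - 1) % (m + 1) + 1
-- ===== Notes on version B (the rewrite author's own statement) =====
-- stated objective: faster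
-- what changed: Replaces A's count-up loop (try CompRemove = 1, 2, ... until (n - CompRemove) is divisible by m+1 or CompRemove reaches n) with the closed form (n - 1) % (m + 1) + 1; Pre_ restricts to the game's natural domain m >= 0, excluding negative m where A raises ZeroDivisionError (m = -1, n != 1) or returns an artifact of its count-up that a closed form has no reason to match.
-- outside the precondition, e.g. on computador_escolhe_jogada(10, -5): A returns 2, B returns -2; on computador_escolhe_jogada(1, -1): A returns 1, B raises ZeroDivisionError
import Mathlib
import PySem

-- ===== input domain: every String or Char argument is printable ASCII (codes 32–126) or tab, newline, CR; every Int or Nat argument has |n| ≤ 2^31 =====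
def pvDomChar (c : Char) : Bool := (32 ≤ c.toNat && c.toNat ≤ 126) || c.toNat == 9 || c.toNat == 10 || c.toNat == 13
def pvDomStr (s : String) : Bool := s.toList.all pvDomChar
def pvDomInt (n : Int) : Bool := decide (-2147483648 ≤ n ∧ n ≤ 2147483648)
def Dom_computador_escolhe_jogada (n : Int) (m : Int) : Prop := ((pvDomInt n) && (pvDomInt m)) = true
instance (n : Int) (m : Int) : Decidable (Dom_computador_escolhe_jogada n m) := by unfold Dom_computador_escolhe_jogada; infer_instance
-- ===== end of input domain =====

-- B replaces A's linear count-up with the O(1) closed form (n-1) % (m+1) + 1; equivalence is claimed on the game's natural domain m ≥ 0.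

-- ===== PORT A =====
-- A's while-loop, fuel-guarded (fuel only makes the same count-up total; it is
-- always sufficient on Pre_, see computador_escolhe_jogada_spec).
def pvLoopA (fuel : Nat) (n m r : Int) : Int :=
  match fuel with
  | 0 => r
  | f + 1 =>
    if r ≠ n then
      if PySem.Int.mod (n - r) (m + 1) = 0 then r
      else pvLoopA f n m (r + 1)
    else r

def computador_escolhe_jogada (n : Int) (m : Int) : Int :=
  pvLoopA (n.natAbs + m.natAbs + 2) n m 1

-- ===== PORT B =====
def computador_escolhe_jogada_alt (n : Int) (m : Int) : Int :=
  PySem.Int.mod (n - 1) (m + 1) + 1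

-- ===== PRECONDITION & SPEC =====
-- Pre_ restricts to the game's natural domain m ≥ 0 (a non-positive maximum removal is
-- meaningless in Nim): for m = -1 with n ≠ 1 A raises ZeroDivisionError, and for m ≤ -2
-- A's positive value is an artifact of its count-up that B's closed form does not reproduce.
def Pre_computador_escolhe_jogada (n : Int) (m : Int) : Prop := 0 ≤ m
instance (n : Int) (m : Int) : Decidable (Pre_computador_escolhe_jogada n m) := by unfold Pre_computador_escolhe_jogada; infer_instance

def pvWitness_computador_escolhe_jogada : Int × Int := (10, 3)

def Spec_computador_escolhe_jogada (n : Int) (m : Int) (out : Int) : Prop := out = computador_escolhe_jogada_alt n m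
instance (n : Int) (m : Int) (out : Int) : Decidable (Spec_computador_escolhe_jogada n m out) := by unfold Spec_computador_escolhe_jogada; infer_instance

-- ===== CLAIM (what is proved, stated in full; the proofs are below) =====
def Claim_equal_computador_escolhe_jogada : Prop := ∀ (n : Int) (m : Int), Dom_computador_escolhe_jogada n m → Pre_computador_escolhe_jogada n m → Spec_computador_escolhe_jogada n m (computador_escolhe_jogada n m)

-- ===== LEMMAS AND PROOFS =====

-- The loop, run from r with enough fuel, returns T, provided T is the first
-- terminal point at or after r.
theorem pvLoopA_eq (n m T : Int)
    (hTn : T = n ∨ PySem.Int.mod (n - T) (m + 1) = 0)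
    (hpre : ∀ r' : Int, 1 ≤ r' → r' < T →
      r' ≠ n ∧ ¬ PySem.Int.mod (n - r') (m + 1) = 0) :
    ∀ (fuel : Nat) (r : Int), 1 ≤ r → r ≤ T → (T - r).toNat < fuel →
      pvLoopA fuel n m r = T := by
  intro fuel
  induction fuel with
  | zero => intro r _ _ h; omega
  | succ f ih =>
    intro r h1 hrT hfuel
    by_cases hr : r = T
    · rcases hTn with h | h
      · simp [pvLoopA, hr.trans h]
        omega
      · by_cases hn : r = n
        · simp [pvLoopA, hn]
          omega
        · have hmod : PySem.Int.mod (n - r) (m + 1) = 0 := by rw [hr]; exact h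
          simp [pvLoopA, hn, hmod]
          omega
    · have hlt : r < T := lt_of_le_of_ne hrT hr
      obtain ⟨hne, hnd⟩ := hpre r h1 hlt
      have : pvLoopA (f + 1) n m r = pvLoopA f n m (r + 1) := by
        simp [pvLoopA, hne, hnd]
      rw [this]
      exact ih (r + 1) (by omega) (by omega) (by omega)

-- ===== VERDICT (by name: the statement is the Claim_ definition above) =====
theorem computador_escolhe_jogada_spec : Claim_equal_computador_escolhe_jogada := by
  intro n m _ hm
  have hm0 : (0:Int) ≤ m := hm
  unfold Spec_computador_escolhe_jogada computador_escolhe_jogada computador_escolhe_jogada_alt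
  set k : Int := m + 1 with hk
  have hkpos : 0 < k := by omega
  have hmodeq : ∀ x : Int, PySem.Int.mod x k = x % k := fun x =>
    PySem.Int.mod_eq_emod_of_pos hkpos
  set T : Int := PySem.Int.mod (n - 1) k + 1 with hT
  have hTe : T = (n - 1) % k + 1 := by rw [hT, hmodeq]
  have hT1 : 1 ≤ T := by
    have := Int.emod_nonneg (n - 1) (by omega : k ≠ 0); omega
  have hTk : T ≤ k := by
    have := Int.emod_lt_of_pos (n - 1) hkpos; omega
  have hdvdT : k ∣ (n - T) := by
    refine ⟨(n - 1) / k, ?_⟩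
    have := Int.ediv_add_emod (n - 1) k
    omega
  have hTn : 1 ≤ n → T ≤ n := by
    intro hn
    by_cases h : n - 1 < k
    · have : (n - 1) % k = n - 1 := Int.emod_eq_of_lt (by omega) h
      omega
    · have := Int.emod_lt_of_pos (n - 1) hkpos; omega
  have hterm : T = n ∨ PySem.Int.mod (n - T) k = 0 := by
    right
    rw [hmodeq]
    obtain ⟨c, hc⟩ := hdvdT
    rw [hc]
    exact Int.mul_emod_right k c
  have hpre' : ∀ r' : Int, 1 ≤ r' → r' < T →
      r' ≠ n ∧ ¬ PySem.Int.mod (n - r') k = 0 := by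
    intro r' h1 h2
    constructor
    · by_cases hn : 1 ≤ n
      · have := hTn hn; omega
      · omega
    · intro hd
      rw [hmodeq] at hd
      have hdv : k ∣ (n - r') := Int.dvd_of_emod_eq_zero hd
      have hkd : k ∣ (T - r') := by
        have h3 := dvd_sub hdv hdvdT
        have he : n - r' - (n - T) = T - r' := by ring
        rwa [he] at h3
      have := Int.le_of_dvd (by omega) hkd
      omega
  have := pvLoopA_eq n m T hterm hpre' (n.natAbs + m.natAbs + 2) 1 le_rfl hT1 (by omega)
  rw [this]
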